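-- pv_equiv track=rewrite | github.com/JatinSachdeva2004/Traffic_Intersection_Monitoring | utils.py | create_detection_summary
-- ===== SOURCE A (Python) =====
-- from typing import Dict, List, Tuple, Optional, Any
--
-- def create_detection_summary(detections: List[Dict]) -> Dict[str, int]:
--     """
--     Create summary of detections
--
--     Args:
--         detections: List of detection dictionaries
--
--     Returns:
--         Dictionary with detection counts by type
--     """
--     summary = {
--         'total': len(detections),
--         'vehicles': 0,
--         'pedestrians': 0,
--         'traffic_signs': 0,
--         'bicycles': 0,
--         'motorcycles': 0,
--         'license_plates': 0
--     }
--
--     vehicle_types = {}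
--
--     for detection in detections:
--         detection_type = detection.get('type', '')
--         class_name = detection.get('class_name', '').lower()
--
--         if detection_type == 'vehicle':
--             summary['vehicles'] += 1
--             vehicle_type = detection.get('vehicle_type', 'unknown')
--             vehicle_types[vehicle_type] = vehicle_types.get(vehicle_type, 0) + 1
--
--             # Count license plates
--             if detection.get('license_plate'):
--                 summary['license_plates'] += 1
--
--         elif 'person' in class_name:
--             summary['pedestrians'] += 1
--         elif detection_type == 'traffic_sign':
--             summary['traffic_signs'] += 1
--         elif 'bicycle' in class_name:
--             summary['bicycles'] += 1
--         elif 'motorcycle' in class_name: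
--             summary['motorcycles'] += 1
--
--     # Add vehicle type breakdowns
--     for vehicle_type, count in vehicle_types.items():
--         summary[f"vehicle_{vehicle_type}"] = count
--
--     return summary
-- ===== SOURCE B (Python) =====
-- from collections import Counter
--
-- def create_detection_summary(detections):
--     """Summary of detections via independent filtering passes (alternative decomposition)."""
--     def cls(d):
--         return d.get('class_name', '').lower()
--     vehicles = [d for d in detections if d.get('type', '') == 'vehicle']
--     others = [d for d in detections if d.get('type', '') != 'vehicle']
--     non_person = [d for d in others if 'person' not in cls(d)]
--     non_sign = [d for d in non_person if d.get('type', '') != 'traffic_sign']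
--     summary = {
--         'total': len(detections),
--         'vehicles': len(vehicles),
--         'pedestrians': len(others) - len(non_person),
--         'traffic_signs': len(non_person) - len(non_sign),
--         'bicycles': sum(1 for d in non_sign if 'bicycle' in cls(d)),
--         'motorcycles': sum(1 for d in non_sign
--                            if 'bicycle' not in cls(d) and 'motorcycle' in cls(d)),
--         'license_plates': sum(1 for d in vehicles if d.get('license_plate')),
--     }
--     for vt, c in Counter(d.get('vehicle_type', 'unknown') for d in vehicles).items():
--         summary['vehicle_' + vt] = c
--     return summary
-- ===== Notes on version B (the rewrite author's own statement) =====
-- stated objective: alternative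
-- what changed: Replaces A's single fused if/elif loop over detections with independent filtering passes (vehicles, successive remainder lists for pedestrians/signs/bicycles/motorcycles with the elif precedence expressed as nested filters) plus a Counter over the vehicle detections for the vehicle_type breakdown.
import Mathlib
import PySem

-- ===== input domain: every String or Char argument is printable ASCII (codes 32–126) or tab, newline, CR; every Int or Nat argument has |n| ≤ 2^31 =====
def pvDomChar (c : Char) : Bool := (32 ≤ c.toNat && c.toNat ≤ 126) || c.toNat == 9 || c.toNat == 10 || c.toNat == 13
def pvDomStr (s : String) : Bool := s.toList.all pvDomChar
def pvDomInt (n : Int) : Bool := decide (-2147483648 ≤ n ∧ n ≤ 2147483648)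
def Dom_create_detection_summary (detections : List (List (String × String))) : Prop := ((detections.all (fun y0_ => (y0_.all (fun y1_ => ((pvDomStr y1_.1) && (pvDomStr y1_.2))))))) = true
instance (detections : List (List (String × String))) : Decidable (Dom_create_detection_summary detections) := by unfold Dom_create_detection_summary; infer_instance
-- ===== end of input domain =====

-- B replaces A's single fused if/elif loop by independent filtering passes plus a Counter over the
-- vehicle detections (alternative decomposition, same cost).

-- detection.get(k, dflt) on an association-list dict (first match)
def pyDGet (d : List (String × String)) (k dflt : String) : String :=
  (PySem.Dict.mk d).getD k dflt

-- ===== PORT A =====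
-- the body of A's single for-loop over detections (state: (summary, vehicle_types))
def aStep (st : PySem.Dict String Int × PySem.Dict String Int) (detection : List (String × String)) :
    PySem.Dict String Int × PySem.Dict String Int :=
  let summary := st.1
  let vehicle_types := st.2
  let detection_type := pyDGet detection "type" ""
  let class_name := PySem.Str.lower (pyDGet detection "class_name" "")
  if detection_type == "vehicle" then
    let summary := summary.insert "vehicles" (summary.getD "vehicles" 0 + 1)
    let vehicle_type := pyDGet detection "vehicle_type" "unknown"
    let vehicle_types := vehicle_types.insert vehicle_type (vehicle_types.getD vehicle_type 0 + 1)
    -- 'if detection.get('license_plate'):' — truthy iff present and non-empty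
    let summary := if pyDGet detection "license_plate" "" ≠ "" then
        summary.insert "license_plates" (summary.getD "license_plates" 0 + 1) else summary
    (summary, vehicle_types)
  else if PySem.Str.isIn "person" class_name then
    (summary.insert "pedestrians" (summary.getD "pedestrians" 0 + 1), vehicle_types)
  else if detection_type == "traffic_sign" then
    (summary.insert "traffic_signs" (summary.getD "traffic_signs" 0 + 1), vehicle_types)
  else if PySem.Str.isIn "bicycle" class_name then
    (summary.insert "bicycles" (summary.getD "bicycles" 0 + 1), vehicle_types)
  else if PySem.Str.isIn "motorcycle" class_name then
    (summary.insert "motorcycles" (summary.getD "motorcycles" 0 + 1), vehicle_types)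
  else (summary, vehicle_types)

def create_detection_summary (detections : List (List (String × String))) : List (String × Int) :=
  let summary : PySem.Dict String Int :=
    PySem.Dict.ofList [("total", (detections.length : Int)), ("vehicles", 0), ("pedestrians", 0),
      ("traffic_signs", 0), ("bicycles", 0), ("motorcycles", 0), ("license_plates", 0)]
  let st := detections.foldl aStep (summary, PySem.Dict.empty)
  -- for vehicle_type, count in vehicle_types.items(): summary[f"vehicle_{vehicle_type}"] = count
  (st.2.items.foldl (fun s p => s.insert (PySem.Str.join "" ["vehicle_", p.1]) p.2) st.1).items

-- ===== PORT B =====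
def bCls (d : List (String × String)) : String :=
  PySem.Str.lower (pyDGet d "class_name" "")

def create_detection_summary_alt (detections : List (List (String × String))) : List (String × Int) :=
  let vehicles := detections.filter (fun d => pyDGet d "type" "" == "vehicle")
  let others := detections.filter (fun d => !(pyDGet d "type" "" == "vehicle"))
  let non_person := others.filter (fun d => !(PySem.Str.isIn "person" (bCls d)))
  let non_sign := non_person.filter (fun d => !(pyDGet d "type" "" == "traffic_sign"))
  let summary : PySem.Dict String Int := PySem.Dict.ofList [
    ("total", (detections.length : Int)),
    ("vehicles", (vehicles.length : Int)),
    ("pedestrians", (others.length : Int) - (non_person.length : Int)),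
    ("traffic_signs", (non_person.length : Int) - (non_sign.length : Int)),
    ("bicycles", ((non_sign.filter (fun d => PySem.Str.isIn "bicycle" (bCls d))).length : Int)),
    ("motorcycles", ((non_sign.filter (fun d =>
        !(PySem.Str.isIn "bicycle" (bCls d)) && PySem.Str.isIn "motorcycle" (bCls d))).length : Int)),
    ("license_plates", ((vehicles.filter (fun d => pyDGet d "license_plate" "" ≠ "")).length : Int))]
  let counter := PySem.Dict.counter (vehicles.map (fun d => pyDGet d "vehicle_type" "unknown"))
  (counter.items.foldl (fun s p => s.insert (PySem.Str.join "" ["vehicle_", p.1]) p.2) summary).items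

-- ===== PRECONDITION & SPEC =====
def Spec_create_detection_summary (detections : List (List (String × String))) (out : List (String × Int)) : Prop := out = create_detection_summary_alt detections
instance (detections : List (List (String × String))) (out : List (String × Int)) : Decidable (Spec_create_detection_summary detections out) := by unfold Spec_create_detection_summary; infer_instance

-- ===== CLAIM (what is proved, stated in full; the proofs are below) =====
def Claim_equal_create_detection_summary : Prop := ∀ (detections : List (List (String × String))), Dom_create_detection_summary detections → Spec_create_detection_summary detections (create_detection_summary detections)

-- ===== LEMMAS AND PROOFS =====
def mkSum (n v p t b m lp : Int) : PySem.Dict String Int :=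
  PySem.Dict.mk [("total", n), ("vehicles", v), ("pedestrians", p),
    ("traffic_signs", t), ("bicycles", b), ("motorcycles", m), ("license_plates", lp)]

lemma ofList7 (n v p t b m lp : Int) :
    PySem.Dict.ofList [("total", n), ("vehicles", v), ("pedestrians", p),
      ("traffic_signs", t), ("bicycles", b), ("motorcycles", m), ("license_plates", lp)] =
      mkSum n v p t b m lp := by
  simp [PySem.Dict.ofList, PySem.Dict.insert, PySem.Dict.contains, PySem.Dict.empty, mkSum,
    PySem.Dict.update]

lemma ins_veh (n v p t b m lp : Int) :
    (mkSum n v p t b m lp).insert "vehicles" ((mkSum n v p t b m lp).getD "vehicles" 0 + 1) =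
      mkSum n (v+1) p t b m lp := by
  simp [mkSum, PySem.Dict.insert, PySem.Dict.contains, PySem.Dict.getD, PySem.Dict.get?]

lemma ins_lp (n v p t b m lp : Int) :
    (mkSum n v p t b m lp).insert "license_plates" ((mkSum n v p t b m lp).getD "license_plates" 0 + 1) =
      mkSum n v p t b m (lp+1) := by
  simp [mkSum, PySem.Dict.insert, PySem.Dict.contains, PySem.Dict.getD, PySem.Dict.get?]

lemma ins_ped (n v p t b m lp : Int) :
    (mkSum n v p t b m lp).insert "pedestrians" ((mkSum n v p t b m lp).getD "pedestrians" 0 + 1) =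
      mkSum n v (p+1) t b m lp := by
  simp [mkSum, PySem.Dict.insert, PySem.Dict.contains, PySem.Dict.getD, PySem.Dict.get?]

lemma ins_ts (n v p t b m lp : Int) :
    (mkSum n v p t b m lp).insert "traffic_signs" ((mkSum n v p t b m lp).getD "traffic_signs" 0 + 1) =
      mkSum n v p (t+1) b m lp := by
  simp [mkSum, PySem.Dict.insert, PySem.Dict.contains, PySem.Dict.getD, PySem.Dict.get?]

lemma ins_bic (n v p t b m lp : Int) :
    (mkSum n v p t b m lp).insert "bicycles" ((mkSum n v p t b m lp).getD "bicycles" 0 + 1) =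
      mkSum n v p t (b+1) m lp := by
  simp [mkSum, PySem.Dict.insert, PySem.Dict.contains, PySem.Dict.getD, PySem.Dict.get?]

lemma ins_mot (n v p t b m lp : Int) :
    (mkSum n v p t b m lp).insert "motorcycles" ((mkSum n v p t b m lp).getD "motorcycles" 0 + 1) =
      mkSum n v p t b (m+1) lp := by
  simp [mkSum, PySem.Dict.insert, PySem.Dict.contains, PySem.Dict.getD, PySem.Dict.get?]

lemma mkSum_congr {n v p t b m lp v' p' t' b' m' lp' : Int}
    (h1 : v = v') (h2 : p = p') (h3 : t = t') (h4 : b = b') (h5 : m = m') (h6 : lp = lp') :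
    mkSum n v p t b m lp = mkSum n v' p' t' b' m' lp' := by
  subst h1 h2 h3 h4 h5 h6; rfl

lemma loopA (l : List (List (String × String))) (n v p t b m lp : Int)
    (vt : PySem.Dict String Int) :
    l.foldl aStep (mkSum n v p t b m lp, vt) =
      (mkSum n
        (v + ((l.filter fun d => pyDGet d "type" "" == "vehicle").length : Int))
        (p + ((l.filter fun d => !(pyDGet d "type" "" == "vehicle") &&
                PySem.Str.isIn "person" (bCls d)).length : Int))
        (t + ((l.filter fun d => !(pyDGet d "type" "" == "vehicle") &&
                !(PySem.Str.isIn "person" (bCls d)) &&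
                (pyDGet d "type" "" == "traffic_sign")).length : Int))
        (b + ((l.filter fun d => !(pyDGet d "type" "" == "vehicle") &&
                !(PySem.Str.isIn "person" (bCls d)) &&
                !(pyDGet d "type" "" == "traffic_sign") &&
                PySem.Str.isIn "bicycle" (bCls d)).length : Int))
        (m + ((l.filter fun d => !(pyDGet d "type" "" == "vehicle") &&
                !(PySem.Str.isIn "person" (bCls d)) &&
                !(pyDGet d "type" "" == "traffic_sign") &&
                !(PySem.Str.isIn "bicycle" (bCls d)) &&
                PySem.Str.isIn "motorcycle" (bCls d)).length : Int))
        (lp + ((l.filter fun d => (pyDGet d "type" "" == "vehicle") &&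
                decide (pyDGet d "license_plate" "" ≠ "")).length : Int)),
       ((l.filter fun d => pyDGet d "type" "" == "vehicle").map
          (fun d => pyDGet d "vehicle_type" "unknown")).foldl
         (fun c x => c.insert x (c.getD x 0 + 1)) vt) := by
  induction l generalizing v p t b m lp vt with
  | nil => simp
  | cons d tl ih =>
    rw [List.foldl_cons]
    by_cases hv : (pyDGet d "type" "" == "vehicle") = true
    · by_cases hl : pyDGet d "license_plate" "" ≠ ""
      · have hl' : decide (pyDGet d "license_plate" "" = "") = false := by simp [hl]
        rw [show aStep (mkSum n v p t b m lp, vt) d =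
            (mkSum n (v+1) p t b m (lp+1),
             vt.insert (pyDGet d "vehicle_type" "unknown")
               (vt.getD (pyDGet d "vehicle_type" "unknown") 0 + 1)) from by
          simp only [aStep, hv, if_true, ins_veh, if_pos hl, ins_lp]]
        rw [ih, Prod.ext_iff]
        refine ⟨mkSum_congr ?_ ?_ ?_ ?_ ?_ ?_, ?_⟩ <;>
          simp only [List.filter_cons, List.length_cons, List.map_cons, List.foldl_cons, bCls, Bool.not_true, Bool.not_false, Bool.true_and, Bool.false_and, Bool.and_true, Bool.and_false, Bool.false_eq_true, decide_not, reduceIte, hv, hl'] <;> (try rfl) <;> (push_cast; ring)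
      · rw [show aStep (mkSum n v p t b m lp, vt) d =
            (mkSum n (v+1) p t b m lp,
             vt.insert (pyDGet d "vehicle_type" "unknown")
               (vt.getD (pyDGet d "vehicle_type" "unknown") 0 + 1)) from by
          simp only [aStep, hv, if_true, ins_veh, if_neg hl]]
        rw [not_not] at hl
        have hl' : decide (pyDGet d "license_plate" "" = "") = true := decide_eq_true hl
        rw [ih, Prod.ext_iff]
        refine ⟨mkSum_congr ?_ ?_ ?_ ?_ ?_ ?_, ?_⟩ <;>
          simp only [List.filter_cons, List.length_cons, List.map_cons, List.foldl_cons, bCls, Bool.not_true, Bool.not_false, Bool.true_and, Bool.false_and, Bool.and_true, Bool.and_false, Bool.false_eq_true, decide_not, reduceIte, hv, hl'] <;> (try rfl) <;> (push_cast; ring)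
    · rw [Bool.not_eq_true] at hv
      by_cases hp : PySem.Str.isIn "person" (PySem.Str.lower (pyDGet d "class_name" "")) = true
      · rw [show aStep (mkSum n v p t b m lp, vt) d = (mkSum n v (p+1) t b m lp, vt) from by
          simp only [aStep, hv, Bool.false_eq_true, if_false, hp, if_true, ins_ped]]
        rw [ih, Prod.ext_iff]
        refine ⟨mkSum_congr ?_ ?_ ?_ ?_ ?_ ?_, ?_⟩ <;>
          simp only [List.filter_cons, List.length_cons, List.map_cons, List.foldl_cons, bCls, Bool.not_true, Bool.not_false, Bool.true_and, Bool.false_and, Bool.and_true, Bool.and_false, Bool.false_eq_true, decide_not, reduceIte, hv, hp] <;> (try rfl) <;> (push_cast; ring)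
      · rw [Bool.not_eq_true] at hp
        by_cases hs : (pyDGet d "type" "" == "traffic_sign") = true
        · rw [show aStep (mkSum n v p t b m lp, vt) d = (mkSum n v p (t+1) b m lp, vt) from by
            simp only [aStep, hv, Bool.false_eq_true, if_false, hp, hs, if_true, ins_ts]]
          rw [ih, Prod.ext_iff]
          refine ⟨mkSum_congr ?_ ?_ ?_ ?_ ?_ ?_, ?_⟩ <;>
            simp only [List.filter_cons, List.length_cons, List.map_cons, List.foldl_cons, bCls, Bool.not_true, Bool.not_false, Bool.true_and, Bool.false_and, Bool.and_true, Bool.and_false, Bool.false_eq_true, decide_not, reduceIte, hv, hp, hs] <;> (try rfl) <;> (push_cast; ring)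
        · rw [Bool.not_eq_true] at hs
          by_cases hb : PySem.Str.isIn "bicycle" (PySem.Str.lower (pyDGet d "class_name" "")) = true
          · rw [show aStep (mkSum n v p t b m lp, vt) d = (mkSum n v p t (b+1) m lp, vt) from by
              simp only [aStep, hv, Bool.false_eq_true, if_false, hp, hs, hb, if_true, ins_bic]]
            rw [ih, Prod.ext_iff]
            refine ⟨mkSum_congr ?_ ?_ ?_ ?_ ?_ ?_, ?_⟩ <;>
              simp only [List.filter_cons, List.length_cons, List.map_cons, List.foldl_cons, bCls, Bool.not_true, Bool.not_false, Bool.true_and, Bool.false_and, Bool.and_true, Bool.and_false, Bool.false_eq_true, decide_not, reduceIte, hv, hp, hs, hb] <;> (try rfl) <;> (push_cast; ring)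
          · rw [Bool.not_eq_true] at hb
            by_cases hm : PySem.Str.isIn "motorcycle" (PySem.Str.lower (pyDGet d "class_name" "")) = true
            · rw [show aStep (mkSum n v p t b m lp, vt) d = (mkSum n v p t b (m+1) lp, vt) from by
                simp only [aStep, hv, Bool.false_eq_true, if_false, hp, hs, hb, hm, if_true, ins_mot]]
              rw [ih, Prod.ext_iff]
              refine ⟨mkSum_congr ?_ ?_ ?_ ?_ ?_ ?_, ?_⟩ <;>
                simp only [List.filter_cons, List.length_cons, List.map_cons, List.foldl_cons, bCls, Bool.not_true, Bool.not_false, Bool.true_and, Bool.false_and, Bool.and_true, Bool.and_false, Bool.false_eq_true, decide_not, reduceIte, hv, hp, hs, hb, hm] <;> (try rfl) <;> (push_cast; ring)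
            · rw [Bool.not_eq_true] at hm
              rw [show aStep (mkSum n v p t b m lp, vt) d = (mkSum n v p t b m lp, vt) from by
                simp only [aStep, hv, Bool.false_eq_true, if_false, hp, hs, hb, hm]]
              rw [ih, Prod.ext_iff]
              refine ⟨mkSum_congr ?_ ?_ ?_ ?_ ?_ ?_, ?_⟩ <;>
                simp only [List.filter_cons, List.length_cons, List.map_cons, List.foldl_cons, bCls, Bool.not_true, Bool.not_false, Bool.true_and, Bool.false_and, Bool.and_true, Bool.and_false, Bool.false_eq_true, decide_not, reduceIte, hv, hp, hs, hb, hm] <;> (try rfl) <;> (push_cast; ring)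

lemma filt_and {α : Type} (l : List α) (q r : α → Bool) :
    (l.filter q).filter r = l.filter (fun x => q x && r x) := by
  rw [List.filter_filter]
  exact List.filter_congr (fun x _ => by cases q x <;> cases r x <;> simp)

lemma sub_filter {α : Type} (l : List α) (q r : α → Bool) :
    ((l.filter q).length : Int) - ((l.filter (fun x => q x && !(r x))).length : Int)
      = ((l.filter (fun x => q x && r x)).length : Int) := by
  induction l with
  | nil => simp
  | cons x tl ih =>
    cases hq : q x <;> cases hr : r x <;>
      simp only [List.filter_cons, hq, hr, Bool.not_true, Bool.not_false, Bool.true_and,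
        Bool.false_and, Bool.and_true, Bool.and_false, Bool.false_eq_true, reduceIte,
        List.length_cons] <;> omega

lemma filt_assoc {α : Type} (l : List α) (a b c : α → Bool) :
    l.filter (fun x => a x && (b x && c x)) = l.filter (fun x => (a x && b x) && c x) :=
  List.filter_congr (fun x _ => by cases a x <;> cases b x <;> cases c x <;> simp)

-- ===== VERDICT (by name: the statement is the Claim_ definition above) =====
theorem create_detection_summary_spec : Claim_equal_create_detection_summary := by
  intro detections _
  unfold Spec_create_detection_summary
  simp only [create_detection_summary, create_detection_summary_alt]
  rw [ofList7, ofList7, loopA]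
  simp only [zero_add]
  rw [PySem.Dict.foldl_insert_getD_add_one_eq_counter]
  simp only [filt_and]
  have e2 : ((detections.filter (fun d => !(pyDGet d "type" "" == "vehicle"))).length : Int) -
      ((detections.filter (fun d => !(pyDGet d "type" "" == "vehicle") &&
        !(PySem.Str.isIn "person" (bCls d)))).length : Int) =
      ((detections.filter (fun d => !(pyDGet d "type" "" == "vehicle") &&
        PySem.Str.isIn "person" (bCls d))).length : Int) :=
    sub_filter detections (fun d => !(pyDGet d "type" "" == "vehicle"))
      (fun d => PySem.Str.isIn "person" (bCls d))
  have e3 : ((detections.filter (fun d => !(pyDGet d "type" "" == "vehicle") &&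
        !(PySem.Str.isIn "person" (bCls d)))).length : Int) -
      ((detections.filter (fun d => (!(pyDGet d "type" "" == "vehicle") &&
        !(PySem.Str.isIn "person" (bCls d))) &&
        !(pyDGet d "type" "" == "traffic_sign"))).length : Int) =
      ((detections.filter (fun d => (!(pyDGet d "type" "" == "vehicle") &&
        !(PySem.Str.isIn "person" (bCls d))) &&
        (pyDGet d "type" "" == "traffic_sign"))).length : Int) :=
    sub_filter detections
      (fun d => !(pyDGet d "type" "" == "vehicle") && !(PySem.Str.isIn "person" (bCls d)))
      (fun d => pyDGet d "type" "" == "traffic_sign")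
  have e5 : detections.filter (fun d => ((!(pyDGet d "type" "" == "vehicle") &&
        !(PySem.Str.isIn "person" (bCls d))) && !(pyDGet d "type" "" == "traffic_sign")) &&
        (!(PySem.Str.isIn "bicycle" (bCls d)) && PySem.Str.isIn "motorcycle" (bCls d))) =
      detections.filter (fun d => (((!(pyDGet d "type" "" == "vehicle") &&
        !(PySem.Str.isIn "person" (bCls d))) && !(pyDGet d "type" "" == "traffic_sign")) &&
        !(PySem.Str.isIn "bicycle" (bCls d))) && PySem.Str.isIn "motorcycle" (bCls d)) :=
    filt_assoc detections
      (fun d => (!(pyDGet d "type" "" == "vehicle") &&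
        !(PySem.Str.isIn "person" (bCls d))) && !(pyDGet d "type" "" == "traffic_sign"))
      (fun d => !(PySem.Str.isIn "bicycle" (bCls d)))
      (fun d => PySem.Str.isIn "motorcycle" (bCls d))
  rw [e2, e3, e5]
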